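-- pv_equiv track=rewrite | github.com/almeidadm/Rosalind | BA1I.py | FrequentWordsWithMismatches
-- ===== SOURCE A (Python) =====
-- nucleotides = ["A", "T", "G", "C"]
--
-- def HammingDistance(p, q):
--     count = 0
--     for i, j in zip(p, q):
--         if i != j:
--             count += 1
--     return count
--
-- def Neighbors(Pattern, d):
--     if d == 0:
--         return [Pattern]
--     if len(Pattern) == 1:
--         return ["A", "C", "G", "T"]
--     Neighborhood = list()
--     SuffixNeighbors = Neighbors(Pattern[1:], d)
--     for Text in SuffixNeighbors:
--         if HammingDistance(Pattern[1:], Text) < d: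
--             for n in nucleotides:
--                     Neighborhood.append(n+Text)
--         else:
--             Neighborhood.append(Pattern[0]+Text)
--     return Neighborhood
--
-- def FrequentWordsWithMismatches(Text, k, d):
--     FrequentPatterns = list()
--     Count = dict()
--     for i in range(len(Text)-k+1):
--         neighbor = Neighbors(Text[i:i+k], d)
--         for n in neighbor:
--             Count[n] = Count.get(n, 0) + 1
--
--     maxCount = max(Count.values())
--
--     for pattern, count in Count.items():
--         if count == maxCount:
--             FrequentPatterns.append(pattern)
--     return FrequentPatterns
-- ===== SOURCE B (Python) =====
-- def _neighbors(pattern, d):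
--     # iterative (right-to-left) version of the suffix-recursive Neighbors
--     if d == 0:
--         return [pattern]
--     hood = ["A", "C", "G", "T"]
--     for idx in range(len(pattern) - 2, -1, -1):
--         suffix = pattern[idx + 1:]
--         new = []
--         for t in hood:
--             if sum(a != b for a, b in zip(suffix, t)) < d:
--                 new.extend(c + t for c in "ATGC")
--             else:
--                 new.append(pattern[idx] + t)
--         hood = new
--     return hood
--
--
-- def FrequentWordsWithMismatches(Text, k, d):
--     # count each distinct k-mer once, then expand its neighborhood a single time
--     kmer_count = {}
--     for i in range(len(Text) - k + 1):
--         w = Text[i:i + k]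
--         kmer_count[w] = kmer_count.get(w, 0) + 1
--     Count = {}
--     for w, c in kmer_count.items():
--         for n in _neighbors(w, d):
--             Count[n] = Count.get(n, 0) + c
--     maxCount = max(Count.values())
--     return [p for p, c in Count.items() if c == maxCount]
-- ===== Notes on version B (the rewrite author's own statement) =====
-- stated objective: alternative
-- what changed: B first counts each distinct k-mer of Text in one pass and then expands the d-neighborhood only once per distinct k-mer (adding its multiplicity) instead of recomputing the neighborhood for every window occurrence; the neighbor generator is also rewritten as an iterative right-to-left loop instead of suffix recursion.
import Mathlib
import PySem

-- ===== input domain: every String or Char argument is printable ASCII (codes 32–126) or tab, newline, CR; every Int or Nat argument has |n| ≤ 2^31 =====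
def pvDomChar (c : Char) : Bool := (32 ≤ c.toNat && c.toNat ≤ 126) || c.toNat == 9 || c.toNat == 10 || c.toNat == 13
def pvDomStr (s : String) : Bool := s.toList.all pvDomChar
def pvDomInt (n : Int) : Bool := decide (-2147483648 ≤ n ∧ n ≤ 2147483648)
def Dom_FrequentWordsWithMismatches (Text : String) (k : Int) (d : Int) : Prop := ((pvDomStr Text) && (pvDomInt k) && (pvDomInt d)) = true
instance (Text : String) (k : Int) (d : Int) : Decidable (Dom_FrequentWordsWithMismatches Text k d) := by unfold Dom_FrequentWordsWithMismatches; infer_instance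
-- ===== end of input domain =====

-- B counts each distinct k-mer once and expands its neighborhood a single time
-- (instead of once per window occurrence); equivalence of the return values is proved below.

-- ===== PORT A =====
def nucleotides : List Char := ['A', 'T', 'G', 'C']

def HammingDistance (p q : List Char) : Int :=
  (p.zip q).foldl (fun count ij => if ij.1 ≠ ij.2 then count + 1 else count) 0

def Neighbors (Pattern : List Char) (d : Int) : List (List Char) :=
  if d = 0 then [Pattern]
  else
    match Pattern with
    | [] => []          -- Python recurses forever on an empty pattern with d ≠ 0; excluded by Pre_
    | [_] => [['A'], ['C'], ['G'], ['T']]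
    | c :: rest =>
      (Neighbors rest d).foldl
        (fun Neighborhood t =>
          if HammingDistance rest t < d then
            Neighborhood ++ nucleotides.map (fun n => n :: t)
          else
            Neighborhood ++ [c :: t]) []

def FrequentWordsWithMismatches (Text : String) (k : Int) (d : Int) : List String :=
  let cs := Text.toList
  let Count : PySem.Dict (List Char) Int :=
    (PySem.List.pyRange 0 ((cs.length : Int) - k + 1) 1).foldl
      (fun Count i =>
        (Neighbors (PySem.List.slice cs (some i) (some (i + k))) d).foldl
          (fun Count n => Count.insert n (Count.getD n 0 + 1)) Count)
      PySem.Dict.empty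
  -- max() of an empty sequence raises ValueError; excluded by Pre_ (the default is never used there)
  let maxCount := (PySem.List.max? Count.values (fun v => v)).getD 0
  Count.items.foldl
    (fun FrequentPatterns p =>
      if p.2 == maxCount then FrequentPatterns ++ [String.ofList p.1] else FrequentPatterns) []

-- ===== PORT B =====
def neighborsIter (pattern : List Char) (d : Int) : List (List Char) :=
  if d = 0 then [pattern]
  else
    (PySem.List.pyRange ((pattern.length : Int) - 2) (-1) (-1)).foldl
      (fun hood idx =>
        let suffix := PySem.List.slice pattern (some (idx + 1)) none
        hood.foldl
          (fun new t =>
            if ((suffix.zip t).foldl (fun s ab => s + (if ab.1 ≠ ab.2 then 1 else 0)) (0 : Int)) < d then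
              new ++ ("ATGC".toList.map (fun c => c :: t))
            else
              new ++ [PySem.List.pyGetD pattern idx ' ' :: t]) [])
      [['A'], ['C'], ['G'], ['T']]

def FrequentWordsWithMismatches_alt (Text : String) (k : Int) (d : Int) : List String :=
  let cs := Text.toList
  let kmerCount : PySem.Dict (List Char) Int :=
    (PySem.List.pyRange 0 ((cs.length : Int) - k + 1) 1).foldl
      (fun kc i =>
        let w := PySem.List.slice cs (some i) (some (i + k))
        kc.insert w (kc.getD w 0 + 1))
      PySem.Dict.empty
  let Count : PySem.Dict (List Char) Int :=
    kmerCount.items.foldl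
      (fun C wc =>
        (neighborsIter wc.1 d).foldl (fun C n => C.insert n (C.getD n 0 + wc.2)) C)
      PySem.Dict.empty
  let maxCount := (PySem.List.max? Count.values (fun v => v)).getD 0
  (Count.items.filter (fun p => p.2 == maxCount)).map (fun p => String.ofList p.1)

-- ===== PRECONDITION & SPEC =====
-- Pre_ excludes exactly the inputs on which the Python A raises: k > len(Text) (max() of the
-- empty Count raises ValueError) and k ≤ 0 with d ≠ 0 (Neighbors("", d) recurses forever:
-- RecursionError).
def Pre_FrequentWordsWithMismatches (Text : String) (k : Int) (d : Int) : Prop :=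
  k ≤ (Text.toList.length : Int) ∧ (0 < k ∨ d = 0)
instance (Text : String) (k : Int) (d : Int) : Decidable (Pre_FrequentWordsWithMismatches Text k d) := by unfold Pre_FrequentWordsWithMismatches; infer_instance

def pvWitness_FrequentWordsWithMismatches : String × Int × Int := ("ACGT", 2, 1)

def Spec_FrequentWordsWithMismatches (Text : String) (k : Int) (d : Int) (out : List String) : Prop := out = FrequentWordsWithMismatches_alt Text k d
instance (Text : String) (k : Int) (d : Int) (out : List String) : Decidable (Spec_FrequentWordsWithMismatches Text k d out) := by unfold Spec_FrequentWordsWithMismatches; infer_instance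

-- ===== CLAIM (what is proved, stated in full; the proofs are below) =====
def Claim_equal_FrequentWordsWithMismatches : Prop := ∀ (Text : String) (k : Int) (d : Int), Dom_FrequentWordsWithMismatches Text k d → Pre_FrequentWordsWithMismatches Text k d → Spec_FrequentWordsWithMismatches Text k d (FrequentWordsWithMismatches Text k d)


-- ===== LEMMAS AND PROOFS =====

-- --- B's neighbor loop equals A's suffix recursion ---

-- the body of B's index loop, named for the proofs
def nbStep (p : List Char) (d : Int) (hood : List (List Char)) (idx : Int) : List (List Char) :=
  hood.foldl
    (fun new t =>
      if (((PySem.List.slice p (some (idx + 1)) none).zip t).foldl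
            (fun s ab => s + (if ab.1 ≠ ab.2 then 1 else 0)) (0 : Int)) < d then
        new ++ ("ATGC".toList.map (fun c => c :: t))
      else
        new ++ [PySem.List.pyGetD p idx ' ' :: t]) []

theorem neighborsIter_eq_foldl (p : List Char) (d : Int) (hd : d ≠ 0) :
    neighborsIter p d
      = (PySem.List.pyRange ((p.length : Int) - 2) (-1) (-1)).foldl (nbStep p d)
          [['A'], ['C'], ['G'], ['T']] := by
  simp only [neighborsIter, if_neg hd]
  rfl

theorem zipsum_eq (l : List (Char × Char)) (a : Int) :
    l.foldl (fun s ab => s + (if ab.1 ≠ ab.2 then 1 else 0)) a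
      = l.foldl (fun count ij => if ij.1 ≠ ij.2 then count + 1 else count) a := by
  congr 1
  funext s ab
  split <;> simp

theorem nbStep_drop (p : List Char) (d : Int) (hd : d ≠ 0) (m : Nat) (h : m + 1 < p.length) :
    nbStep p d (Neighbors (p.drop (m + 1)) d) (m : Int) = Neighbors (p.drop m) d := by
  have hdrop : p.drop m = p[m] :: p.drop (m + 1) := List.drop_eq_getElem_cons (by omega)
  have hne : p.drop (m + 1) ≠ [] := by
    have : (p.drop (m + 1)).length = p.length - (m + 1) := List.length_drop ..
    intro hcontra; rw [hcontra] at this; simp at this; omega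
  obtain ⟨x, xs, hx⟩ := List.exists_cons_of_ne_nil hne
  rw [hdrop, hx]
  have hslice : PySem.List.slice p (some ((m : Int) + 1)) none = p.drop (m + 1) := by
    have := PySem.List.slice_from_natCast (xs := p) (a := m + 1)
    rw [← this]; push_cast; ring_nf
  have hget : PySem.List.pyGetD p (m : Int) ' ' = p[m] := by
    rw [PySem.List.pyGetD_natCast]
    exact List.getD_eq_getElem p ' ' (by omega)
  show nbStep p d (Neighbors (x :: xs) d) (m : Int) = Neighbors (p[m] :: x :: xs) d
  unfold nbStep
  rw [hslice, hx]
  have hN : Neighbors (p[m] :: x :: xs) d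
      = (Neighbors (x :: xs) d).foldl
          (fun Neighborhood t =>
            if HammingDistance (x :: xs) t < d then
              Neighborhood ++ nucleotides.map (fun n => n :: t)
            else Neighborhood ++ [p[m] :: t]) [] := by
    rw [Neighbors] <;> simp [hd]
  rw [hN]
  apply PySem.List.foldl_congr_mem
  intro new t _
  rw [zipsum_eq, hget]
  rfl

theorem nbFold_eq (p : List Char) (d : Int) (hd : d ≠ 0) :
    ∀ m : Nat, m < p.length →
      (PySem.List.pyRange ((m : Int) - 1) (-1) (-1)).foldl (nbStep p d)
          (Neighbors (p.drop m) d)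
        = Neighbors p d
  | 0, _ => by
      rw [PySem.List.pyRange_neg_one_eq_nil (by omega)]
      simp
  | (m + 1), h => by
      rw [show ((m + 1 : Nat) : Int) - 1 = (m : Int) by push_cast; ring]
      rw [PySem.List.pyRange_neg_one_cons (by omega), List.foldl_cons]
      rw [nbStep_drop p d hd m h]
      exact nbFold_eq p d hd m (by omega)

theorem neighborsIter_eq (p : List Char) (d : Int) (hp : p ≠ []) :
    neighborsIter p d = Neighbors p d := by
  by_cases hd : d = 0
  · subst hd
    rw [neighborsIter, Neighbors.eq_def]
    simp
  · have h1 : 0 < p.length := List.length_pos_iff.mpr hp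
    have hlast : p.drop (p.length - 1) = [p[p.length - 1]] := by
      rw [List.drop_eq_getElem_cons (by omega),
          show p.length - 1 + 1 = p.length from by omega, List.drop_length]
    have hsing : Neighbors (p.drop (p.length - 1)) d = [['A'], ['C'], ['G'], ['T']] := by
      rw [hlast, Neighbors, if_neg hd]
    rw [neighborsIter_eq_foldl p d hd,
        show ((p.length : Int) - 2) = ((p.length - 1 : Nat) : Int) - 1 by
          rw [Nat.cast_sub (by omega)]; push_cast; ring,
        ← hsing]
    exact nbFold_eq p d hd (p.length - 1) (by omega)


-- --- weighted-counter machinery (proof-only helpers) ---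

def bump (C : PySem.Dict (List Char) Int) (x : List Char) (c : Int) : PySem.Dict (List Char) Int :=
  C.insert x (C.getD x 0 + c)

def wcounter (ps : List (List Char × Int)) : PySem.Dict (List Char) Int :=
  ps.foldl (fun C p => bump C p.1 p.2) PySem.Dict.empty

def wsum (ps : List (List Char × Int)) (v : List Char) : Int :=
  ((ps.filter (fun p => p.1 == v)).map (·.2)).sum

theorem wsum_append (ps qs : List (List Char × Int)) (v : List Char) :
    wsum (ps ++ qs) v = wsum ps v + wsum qs v := by
  simp [wsum, List.filter_append]

theorem wsum_singleton (p : List Char × Int) (v : List Char) :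
    wsum [p] v = if p.1 == v then p.2 else 0 := by
  by_cases h : p.1 = v <;> simp [wsum, h]

theorem wsum_cons (p : List Char × Int) (ps : List (List Char × Int)) (v : List Char) :
    wsum (p :: ps) v = (if p.1 == v then p.2 else 0) + wsum ps v := by
  rw [show p :: ps = [p] ++ ps from rfl, wsum_append, wsum_singleton]

theorem wsum_eq_zero_of_not_mem (ps : List (List Char × Int)) (v : List Char)
    (h : ¬ v ∈ ps.map (·.1)) : wsum ps v = 0 := by
  have hnil : ps.filter (fun p => p.1 == v) = [] := by
    rw [List.filter_eq_nil_iff]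
    intro p hp
    simp only [beq_iff_eq]
    intro hv
    exact h (List.mem_map.mpr ⟨p, hp, hv⟩)
  simp [wsum, hnil]

theorem wcounter_append_singleton (ps : List (List Char × Int)) (p : List Char × Int) :
    wcounter (ps ++ [p]) = bump (wcounter ps) p.1 p.2 := by
  rw [wcounter, List.foldl_append]
  rfl

theorem wcounter_items (ps : List (List Char × Int)) :
    (wcounter ps).items
      = (PySem.Set.ofList (ps.map (·.1))).map (fun v => (v, wsum ps v)) := by
  induction ps using List.reverseRecOn with
  | nil => rfl
  | append_singleton ps p IH =>
    have hkeys : (wcounter ps).keys = PySem.Set.ofList (ps.map (·.1)) := by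
      simp only [PySem.Dict.keys, IH, List.map_map]
      exact List.map_id _ ▸ rfl
    have hnds : (PySem.Set.ofList (ps.map (·.1))).Nodup := PySem.Set.nodup_ofList _
    have hndk : (wcounter ps).keys.Nodup := by rw [hkeys]; exact hnds
    rw [wcounter_append_singleton, List.map_append]
    simp only [List.map_cons, List.map_nil]
    rw [PySem.Set.ofList_append_singleton]
    by_cases hm : p.1 ∈ PySem.Set.ofList (ps.map (·.1))
    · have hc : (wcounter ps).contains p.1 = true := by
        rw [PySem.Dict.contains_iff_mem_keys, hkeys]; exact hm
      have hmem_items : (p.1, wsum ps p.1) ∈ (wcounter ps).items := by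
        rw [IH]; exact List.mem_map_of_mem hm
      have hgd : (wcounter ps).getD p.1 0 = wsum ps p.1 :=
        PySem.Dict.getD_of_mem_items _ hmem_items hndk 0
      rw [PySem.Set.add_of_mem hm,
          show bump (wcounter ps) p.1 p.2
              = (wcounter ps).insert p.1 ((wcounter ps).getD p.1 0 + p.2) from rfl,
          PySem.Dict.items_insert_of_contains _ _ hc, IH, List.map_map]
      apply List.map_congr_left
      intro v hv
      by_cases hv1 : v = p.1
      · subst hv1
        simp [hgd, wsum_append, wsum_singleton]
      · have : ¬ (p.1 = v) := fun e => hv1 e.symm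
        simp [Function.comp, hv1, this, wsum_append, wsum_singleton]
    · have hc : (wcounter ps).contains p.1 = false := by
        rw [← Bool.not_eq_true, PySem.Dict.contains_iff_mem_keys, hkeys]
        exact hm
      rw [PySem.Set.add_of_not_mem hm,
          show bump (wcounter ps) p.1 p.2
              = (wcounter ps).insert p.1 ((wcounter ps).getD p.1 0 + p.2) from rfl,
          PySem.Dict.items_insert_of_not_contains _ _ hc,
          PySem.Dict.getD_of_not_contains _ 0 hc, IH, List.map_append]
      congr 1
      · apply List.map_congr_left
        intro v hv
        have hvp : ¬ (p.1 = v) := by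
          intro e; subst e; exact hm hv
        simp [wsum_append, wsum_singleton, hvp]
      · have h0 : wsum ps p.1 = 0 := by
          apply wsum_eq_zero_of_not_mem
          intro hmem
          exact hm (by rw [PySem.Set.mem_ofList]; exact hmem)
        simp [wsum_append, wsum_singleton, h0]

-- --- grouping a sum by the distinct values ---

theorem sum_ite_of_nodup (S : List (List Char)) (w : List Char) (g : List Char → Int)
    (hnd : S.Nodup) (hw : w ∈ S) :
    (S.map (fun u => if w = u then g u else 0)).sum = g w := by
  induction S with
  | nil => cases hw
  | cons x xs IH =>
    obtain ⟨hx, hxs⟩ := List.nodup_cons.mp hnd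
    rcases List.mem_cons.mp hw with h | h
    · subst h
      have hz : (xs.map (fun u => if w = u then g u else 0)).sum = 0 := by
        apply List.sum_eq_zero
        intro y hy
        obtain ⟨u, hu, rfl⟩ := List.mem_map.mp hy
        rw [if_neg]
        intro e; subst e; exact hx hu
      simp [hz]
    · have hwx : ¬ (w = x) := by
        intro e; subst e; exact hx h
      simp [hwx, IH hxs h]

theorem count_flatMap_int (ws : List (List Char)) (g : List Char → List (List Char)) (v : List Char) :
    ((ws.flatMap g).count v : Int) = (ws.map (fun w => ((g w).count v : Int))).sum := by
  induction ws with
  | nil => simp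
  | cons w ws IH =>
    simp only [List.flatMap_cons, List.count_append, List.map_cons, List.sum_cons, ← IH]
    push_cast
    ring

theorem sum_map_eq_sum_dedup (ws : List (List Char)) (f : List Char → Int) :
    (ws.map f).sum
      = ((PySem.Set.ofList ws).map (fun w => (ws.count w : Int) * f w)).sum := by
  induction ws using List.reverseRecOn with
  | nil => rfl
  | append_singleton ws w IH =>
    have hcnt : ∀ u : List Char, ((ws ++ [w]).count u : Int)
        = (ws.count u : Int) + (if w = u then 1 else 0) := by
      intro u
      by_cases h : w = u
      · subst h; simp [List.count_append]
      · simp [List.count_append, h]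
    rw [List.map_append, List.sum_append, PySem.Set.ofList_append_singleton]
    by_cases hw : w ∈ PySem.Set.ofList ws
    · rw [PySem.Set.add_of_mem hw]
      have hsplit : (PySem.Set.ofList ws).map (fun u => ((ws ++ [w]).count u : Int) * f u)
          = (PySem.Set.ofList ws).map (fun u => (ws.count u : Int) * f u + (if w = u then f u else 0)) := by
        apply List.map_congr_left
        intro u _
        rw [hcnt u]
        by_cases h : w = u <;> simp [h]
        ring
      rw [hsplit, PySem.List.sum_map_add_int,
          sum_ite_of_nodup _ w f (PySem.Set.nodup_ofList _) hw, ← IH]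
      simp
    · rw [PySem.Set.add_of_not_mem hw, List.map_append, List.sum_append]
      have hmem : ¬ w ∈ ws := by
        intro h
        rw [← PySem.Set.mem_ofList (xs := ws)] at h
        exact hw h
      have hfirst : (PySem.Set.ofList ws).map (fun u => ((ws ++ [w]).count u : Int) * f u)
          = (PySem.Set.ofList ws).map (fun u => (ws.count u : Int) * f u) := by
        apply List.map_congr_left
        intro u hu
        have : ¬ (w = u) := by
          intro e; subst e; exact hw hu
        rw [hcnt u, if_neg this, add_zero]
      rw [hfirst, ← IH]
      have hc0 : (ws.count w : Int) = 0 := by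
        simp [List.count_eq_zero.mpr hmem]
      simp [hc0]

-- --- deduplicating the windows does not change the first occurrences of the neighborhoods ---

theorem update_of_subset (s : PySem.Set (List Char)) (l : List (List Char))
    (h : ∀ x ∈ l, x ∈ s) : PySem.Set.update s l = s := by
  rw [PySem.Set.update_eq_append_filter]
  have hnil : (PySem.Set.ofList l).filter (fun y => !(PySem.Set.contains s y)) = [] := by
    rw [List.filter_eq_nil_iff]
    intro y hy
    rw [PySem.Set.mem_ofList] at hy
    have hc : PySem.Set.contains s y = true := by
      rw [PySem.Set.contains_iff]
      exact h y hy
    simp only [hc, Bool.not_true]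
    simp
  rw [hnil, List.append_nil]

theorem ofList_flatMap_ofList (ws : List (List Char)) (g : List Char → List (List Char)) :
    PySem.Set.ofList ((PySem.Set.ofList ws).flatMap g) = PySem.Set.ofList (ws.flatMap g) := by
  induction ws using List.reverseRecOn with
  | nil => rfl
  | append_singleton ws w IH =>
    rw [PySem.Set.ofList_append_singleton]
    rw [List.flatMap_append, PySem.Set.ofList_append, List.flatMap_cons, List.flatMap_nil,
        List.append_nil]
    by_cases hw : w ∈ PySem.Set.ofList ws
    · rw [PySem.Set.add_of_mem hw, IH]
      symm
      apply update_of_subset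
      intro x hx
      rw [PySem.Set.mem_ofList]
      have hwws : w ∈ ws := by
        rw [← PySem.Set.mem_ofList (xs := ws)]
        exact hw
      exact List.mem_flatMap.mpr ⟨w, hwws, hx⟩
    · rw [PySem.Set.add_of_not_mem hw, List.flatMap_append, PySem.Set.ofList_append, IH,
          List.flatMap_cons, List.flatMap_nil, List.append_nil]


-- --- normal forms of the two ports ---

theorem wsum_flatMap (l : List (List Char)) (g : List Char → List (List Char × Int)) (v : List Char) :
    wsum (l.flatMap g) v = (l.map (fun w => wsum (g w) v)).sum := by
  induction l with
  | nil => simp [wsum]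
  | cons w l IH => rw [List.flatMap_cons, wsum_append, List.map_cons, List.sum_cons, IH]

theorem wsum_block (N : List (List Char)) (c : Int) (v : List Char) :
    wsum (N.map (fun nb => (nb, c))) v = (N.count v : Int) * c := by
  induction N with
  | nil => simp [wsum]
  | cons nb N IH =>
    rw [List.map_cons, wsum_cons, IH, List.count_cons]
    by_cases h : nb = v
    · subst h
      simp
      ring
    · simp [h]

def windows (cs : List Char) (k : Int) : List (List Char) :=
  (PySem.List.pyRange 0 ((cs.length : Int) - k + 1) 1).map
    (fun i => PySem.List.slice cs (some i) (some (i + k)))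

def countA (cs : List Char) (k d : Int) : PySem.Dict (List Char) Int :=
  PySem.Dict.counter ((windows cs k).flatMap (fun w => Neighbors w d))

def pairsB (cs : List Char) (k d : Int) : List (List Char × Int) :=
  (PySem.Set.ofList (windows cs k)).flatMap
    (fun w => (neighborsIter w d).map (fun nb => (nb, ((windows cs k).count w : Int))))

def finish (Count : PySem.Dict (List Char) Int) : List String :=
  (Count.items.filter
      (fun p => p.2 == (PySem.List.max? Count.values (fun v => v)).getD 0)).map
    (fun p => String.ofList p.1)

theorem A_count (cs : List Char) (k d : Int) :
    (PySem.List.pyRange 0 ((cs.length : Int) - k + 1) 1).foldl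
        (fun Count i =>
          (Neighbors (PySem.List.slice cs (some i) (some (i + k))) d).foldl
            (fun Count n => Count.insert n (Count.getD n 0 + 1)) Count)
        PySem.Dict.empty
      = countA cs k d := by
  rw [countA, ← PySem.Dict.foldl_insert_getD_add_one_eq_counter, List.foldl_flatMap, windows,
      List.foldl_map]

theorem portA_eq (Text : String) (k d : Int) :
    FrequentWordsWithMismatches Text k d = finish (countA Text.toList k d) := by
  simp only [FrequentWordsWithMismatches]
  rw [A_count Text.toList k d, PySem.List.foldl_append_if, List.nil_append, finish]

theorem B_kcount (cs : List Char) (k : Int) :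
    (PySem.List.pyRange 0 ((cs.length : Int) - k + 1) 1).foldl
        (fun kc i =>
          kc.insert (PySem.List.slice cs (some i) (some (i + k)))
            (kc.getD (PySem.List.slice cs (some i) (some (i + k))) 0 + 1))
        PySem.Dict.empty
      = PySem.Dict.counter (windows cs k) := by
  rw [← PySem.Dict.foldl_insert_getD_add_one_eq_counter, windows, List.foldl_map]

theorem B_count (cs : List Char) (k d : Int) :
    (PySem.Dict.counter (windows cs k)).items.foldl
        (fun C wc =>
          (neighborsIter wc.1 d).foldl (fun C n => C.insert n (C.getD n 0 + wc.2)) C)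
        PySem.Dict.empty
      = wcounter (pairsB cs k d) := by
  rw [PySem.Dict.items_counter, List.foldl_map, pairsB, wcounter, List.foldl_flatMap]
  simp only [List.foldl_map]
  rfl

theorem portB_eq (Text : String) (k d : Int) :
    FrequentWordsWithMismatches_alt Text k d = finish (wcounter (pairsB Text.toList k d)) := by
  simp only [FrequentWordsWithMismatches_alt]
  rw [B_kcount Text.toList k, B_count Text.toList k d, finish]

-- --- the two count dictionaries coincide ---

theorem counts_eq (cs : List Char) (k d : Int)
    (hN : ∀ w ∈ windows cs k, neighborsIter w d = Neighbors w d) :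
    wcounter (pairsB cs k d) = countA cs k d := by
  have hflat : pairsB cs k d
      = (PySem.Set.ofList (windows cs k)).flatMap
        (fun w => (Neighbors w d).map (fun nb => (nb, ((windows cs k).count w : Int)))) := by
    rw [pairsB]
    apply List.flatMap_congr
    intro w hw
    rw [hN w (by rw [← PySem.Set.mem_ofList (xs := windows cs k)]; exact hw)]
  rw [hflat, countA]
  apply PySem.Dict.ext
  rw [wcounter_items, PySem.Dict.items_counter]
  have hfst : ((PySem.Set.ofList (windows cs k)).flatMap
        (fun w => (Neighbors w d).map (fun nb => (nb, ((windows cs k).count w : Int))))).map (·.1)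
      = (PySem.Set.ofList (windows cs k)).flatMap (fun w => Neighbors w d) := by
    rw [List.map_flatMap]
    apply List.flatMap_congr
    intro w _
    simp [Function.comp_def]
  rw [hfst, ofList_flatMap_ofList]
  apply List.map_congr_left
  intro v hv
  rw [wsum_flatMap]
  have hblocks : (PySem.Set.ofList (windows cs k)).map
        (fun w => wsum ((Neighbors w d).map (fun nb => (nb, ((windows cs k).count w : Int)))) v)
      = (PySem.Set.ofList (windows cs k)).map
        (fun w => ((windows cs k).count w : Int) * (((Neighbors w d).count v : Int))) := by
    apply List.map_congr_left
    intro w _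
    rw [wsum_block]
    ring
  rw [hblocks, ← sum_map_eq_sum_dedup, ← count_flatMap_int]

-- --- a window is never empty when 0 < k ---

theorem window_ne_nil (cs : List Char) (k : Int) (hk : k ≤ (cs.length : Int)) (hk0 : 0 < k) :
    ∀ w ∈ windows cs k, w ≠ [] := by
  intro w hw
  obtain ⟨i, hi, rfl⟩ := List.mem_map.mp hw
  have hi' := (PySem.List.mem_pyRange_one).mp hi
  intro hcon
  rw [PySem.List.slice_toNat cs hi'.1 (show (0:Int) ≤ i + k by omega)] at hcon
  have hlen := congrArg List.length hcon
  simp only [List.length_take, List.length_drop, List.length_nil] at hlen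
  omega

-- ===== VERDICT (by name: the statement is the Claim_ definition above) =====
theorem FrequentWordsWithMismatches_spec : Claim_equal_FrequentWordsWithMismatches := by
  intro Text k d _ hpre
  unfold Spec_FrequentWordsWithMismatches
  obtain ⟨hk, hkd⟩ := hpre
  have hN : ∀ w ∈ windows Text.toList k, neighborsIter w d = Neighbors w d := by
    intro w hw
    rcases hkd with hk0 | hd0
    · exact neighborsIter_eq w d (window_ne_nil Text.toList k hk hk0 w hw)
    · subst hd0
      rw [neighborsIter, Neighbors.eq_def]
      simp
  rw [portA_eq, portB_eq, counts_eq Text.toList k d hN]
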